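-- pv_equiv track=rewrite | github.com/medify321-star/medcures | backend/schema_utils.py | normalize_drug_fields
-- ===== SOURCE A (Python) =====
-- FIELD_MAPPING = {
--     'drug': 'name',
--     'Drug': 'name',
--     'name': 'name',
--     'category': 'category',
--     'Category': 'category',
--     'route': 'route',
--     'Route': 'route',
--     'storage': 'storage',
--     'Storage': 'storage',
--     'dose': 'dose',
--     'Dose': 'dose',
--     'uses': 'uses',
--     'Uses': 'uses',
--     'side_effects': 'side_effects',
--     'Side Effects': 'side_effects',
--     'side_effect': 'side_effects',
--     'side_effects_in_arabic': 'side_effects',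
--     'citations': 'citations',
--     'citation': 'citations',
--     'Citation': 'citations',
--     'disclaimer': 'disclaimer',
--     'Disclaimer': 'disclaimer',
-- }
--
-- REQUIRED_FIELDS = [
--     'name', 'category', 'route', 'storage', 'dose',
--     'uses', 'side_effects', 'citations', 'disclaimer'
-- ]
--
-- def normalize_drug_fields(drug):
--     """Return a new dict with normalized field names and all required fields."""
--     norm = {}
--     for k, v in drug.items():
--         key = FIELD_MAPPING.get(k, k).lower()
--         norm[key] = v
--     # Ensure all required fields exist
--     for field in REQUIRED_FIELDS:
--         if field not in norm:
--             norm[field] = ""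
--     # Only keep required fields, in order
--     return {field: norm[field] for field in REQUIRED_FIELDS}
-- ===== SOURCE B (Python) =====
-- FIELD_MAPPING = {
--     'drug': 'name',
--     'Drug': 'name',
--     'name': 'name',
--     'category': 'category',
--     'Category': 'category',
--     'route': 'route',
--     'Route': 'route',
--     'storage': 'storage',
--     'Storage': 'storage',
--     'dose': 'dose',
--     'Dose': 'dose',
--     'uses': 'uses',
--     'Uses': 'uses',
--     'side_effects': 'side_effects',
--     'Side Effects': 'side_effects',
--     'side_effect': 'side_effects',
--     'side_effects_in_arabic': 'side_effects',
--     'citations': 'citations',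
--     'citation': 'citations',
--     'Citation': 'citations',
--     'disclaimer': 'disclaimer',
--     'Disclaimer': 'disclaimer',
-- }
--
-- REQUIRED_FIELDS = [
--     'name', 'category', 'route', 'storage', 'dose',
--     'uses', 'side_effects', 'citations', 'disclaimer'
-- ]
--
-- def normalize_drug_fields(drug):
--     """Return a new dict with normalized field names and all required fields."""
--     rev = list(reversed(drug.items()))
--     def last_value(field):
--         for k, v in rev:
--             if FIELD_MAPPING.get(k, k).lower() == field:
--                 return v
--         return ""
--     return {f: last_value(f) for f in REQUIRED_FIELDS}
-- ===== Notes on version B (the rewrite author's own statement) =====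
-- stated objective: alternative
-- what changed: Instead of building an intermediate normalized dict in three passes (normalize all keys, backfill missing required fields, filter/reorder), B loops over the 9 required fields and finds each field's value directly by a reverse scan of the items (last assignment wins), defaulting to "".
import Mathlib
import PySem

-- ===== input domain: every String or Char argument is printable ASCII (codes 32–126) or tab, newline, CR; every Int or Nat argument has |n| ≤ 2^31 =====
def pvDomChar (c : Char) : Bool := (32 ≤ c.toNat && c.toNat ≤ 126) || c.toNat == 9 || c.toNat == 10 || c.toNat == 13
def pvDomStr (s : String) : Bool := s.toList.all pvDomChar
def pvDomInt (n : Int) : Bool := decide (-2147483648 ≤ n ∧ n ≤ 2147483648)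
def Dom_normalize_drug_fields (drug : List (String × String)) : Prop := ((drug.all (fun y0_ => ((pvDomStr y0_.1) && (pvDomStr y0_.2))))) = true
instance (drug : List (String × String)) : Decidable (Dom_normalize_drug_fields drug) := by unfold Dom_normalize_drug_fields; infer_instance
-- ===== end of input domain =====

-- B replaces A's three dict passes by a per-required-field reverse scan for the last matching value (alternative decomposition, same results).


-- module constants (shared by both Pythons)
def pvFieldMapping : PySem.Dict String String := PySem.Dict.ofList
  [("drug", "name"), ("Drug", "name"), ("name", "name"),
   ("category", "category"), ("Category", "category"),
   ("route", "route"), ("Route", "route"),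
   ("storage", "storage"), ("Storage", "storage"),
   ("dose", "dose"), ("Dose", "dose"),
   ("uses", "uses"), ("Uses", "uses"),
   ("side_effects", "side_effects"), ("Side Effects", "side_effects"),
   ("side_effect", "side_effects"), ("side_effects_in_arabic", "side_effects"),
   ("citations", "citations"), ("citation", "citations"), ("Citation", "citations"),
   ("disclaimer", "disclaimer"), ("Disclaimer", "disclaimer")]

def pvRequiredFields : List String :=
  ["name", "category", "route", "storage", "dose",
   "uses", "side_effects", "citations", "disclaimer"]

-- ===== PORT A =====
-- drug is a Python dict: the assoc list is read through PySem.Dict.ofList (first-position, last-value on duplicates), items = drug.items().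
-- norm[field] in the final comprehension is ported as getD _ "" (the key is always present there: the backfill loop just inserted it).
def normalize_drug_fields (drug : List (String × String)) : List (String × String) :=
  let norm : PySem.Dict String String :=
    (PySem.Dict.ofList drug).items.foldl
      (fun d p => d.insert (PySem.Str.lower (pvFieldMapping.getD p.1 p.1)) p.2)
      PySem.Dict.empty
  let norm2 : PySem.Dict String String :=
    pvRequiredFields.foldl
      (fun d field => if d.contains field then d else d.insert field "") norm
  (pvRequiredFields.foldl (fun d field => d.insert field (norm2.getD field "")) PySem.Dict.empty).items

-- ===== PORT B =====
-- last_value(field): scan the reversed items for the first key mapping to field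
def pvLastValue (rev : List (String × String)) (field : String) : String :=
  match rev with
  | [] => ""
  | p :: rest =>
    if PySem.Str.lower (pvFieldMapping.getD p.1 p.1) = field then p.2
    else pvLastValue rest field

def normalize_drug_fields_alt (drug : List (String × String)) : List (String × String) :=
  let rev := (PySem.Dict.ofList drug).items.reverse
  (pvRequiredFields.foldl (fun d f => d.insert f (pvLastValue rev f)) PySem.Dict.empty).items

-- ===== PRECONDITION & SPEC =====
def Spec_normalize_drug_fields (drug : List (String × String)) (out : List (String × String)) : Prop := out = normalize_drug_fields_alt drug
instance (drug : List (String × String)) (out : List (String × String)) : Decidable (Spec_normalize_drug_fields drug out) := by unfold Spec_normalize_drug_fields; infer_instance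

-- ===== CLAIM (what is proved, stated in full; the proofs are below) =====
def Claim_equal_normalize_drug_fields : Prop := ∀ (drug : List (String × String)), Dom_normalize_drug_fields drug → Spec_normalize_drug_fields drug (normalize_drug_fields drug)

-- ===== LEMMAS AND PROOFS =====

-- the backfill pass does not change any lookup with default ""
theorem pv_backfill_getD (fs : List String) (d : PySem.Dict String String) (f : String) :
    (fs.foldl (fun d field => if d.contains field then d else d.insert field "") d).getD f "" =
      d.getD f "" := by
  induction fs generalizing d with
  | nil => rfl
  | cons g t ih =>
    rw [List.foldl_cons]
    by_cases hc : d.contains g = true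
    · rw [if_pos hc, ih]
    · rw [if_neg hc, ih, PySem.Dict.getD_insert]
      split_ifs with hfg
      · subst hfg
        exact (PySem.Dict.getD_of_not_contains d "" ((Bool.not_eq_true _).mp hc)).symm
      · rfl

-- the normalization fold's lookup is the last matching value of the items (reverse scan)
theorem pv_norm_getD (l : List (String × String)) (f : String) :
    (l.foldl (fun d p => d.insert (PySem.Str.lower (pvFieldMapping.getD p.1 p.1)) p.2)
        PySem.Dict.empty).getD f "" = pvLastValue l.reverse f := by
  induction l using List.reverseRecOn with
  | nil => rfl
  | append_singleton xs p ih =>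
    rw [List.foldl_append, List.foldl_cons, List.foldl_nil, PySem.Dict.getD_insert,
      List.reverse_append, List.reverse_cons, List.reverse_nil, List.nil_append,
      List.cons_append, List.nil_append]
    show _ = pvLastValue (p :: xs.reverse) f
    rw [pvLastValue]
    by_cases h : PySem.Str.lower (pvFieldMapping.getD p.1 p.1) = f
    · rw [if_pos h.symm, if_pos h]
    · rw [if_neg (fun hh => h hh.symm), if_neg h, ih]

-- ===== VERDICT (by name: the statement is the Claim_ definition above) =====
theorem normalize_drug_fields_spec : Claim_equal_normalize_drug_fields := by
  intro drug _
  unfold Spec_normalize_drug_fields normalize_drug_fields normalize_drug_fields_alt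
  refine congrArg PySem.Dict.items ?_
  refine PySem.List.foldl_congr_mem _ _ _ _ ?_
  intro acc f _
  rw [pv_backfill_getD, pv_norm_getD]
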